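-- pv_equiv track=rewrite | github.com/lucylililiwang/normalizer | app.py | has_incorrect_columns
-- ===== SOURCE A (Python) =====
-- def has_incorrect_columns(file_content,delimiter=','):
--     """
--     Check if a CSV file has incorrect number of columns in one or more rows.
--
--
--     Args:
--         file_content (str): Content of the CSV file as a string.
--         delimiter (str): Delimiter used in the CSV file. Default is ','.
--
--     Returns:
--         bool: True if any row has a  different number of columns compared to the others, False otherwise
--
--     """
--     # We are split the file content into lines
--     lines = file_content.splitlines()
--     if not lines:
--         # If there are no lines, return False
--         return False
--     # We are getting the number of columns in the first row
--     first_row_columns = len(lines[0].split(delimiter))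
--     # We are Iterate over the rest of the rows
--     for line in lines[1:]:
--         # We are getting the number of columns in the current row
--         current_row_columns = len(line.split(delimiter))
--         # We are check if the number of columns in the current row is different from the first row, return True
--         if current_row_columns != first_row_columns:
--             return True
--     # When we find out if all rows have the same number of columns as the first row return False
--     return False
-- ===== SOURCE B (Python) =====
-- def has_incorrect_columns(file_content, delimiter=','):
--     # Collect all distinct per-row column counts in one pass; rows are
--     # inconsistent exactly when more than one distinct count exists.
--     counts = {len(line.split(delimiter)) for line in file_content.splitlines()}
--     return len(counts) > 1
-- ===== Notes on version B (the rewrite author's own statement) =====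
-- stated objective: simpler
-- what changed: B replaces the reference-count-plus-early-exit scan with a set comprehension of all per-row column counts and a cardinality test (len(counts) > 1).
import Mathlib
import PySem

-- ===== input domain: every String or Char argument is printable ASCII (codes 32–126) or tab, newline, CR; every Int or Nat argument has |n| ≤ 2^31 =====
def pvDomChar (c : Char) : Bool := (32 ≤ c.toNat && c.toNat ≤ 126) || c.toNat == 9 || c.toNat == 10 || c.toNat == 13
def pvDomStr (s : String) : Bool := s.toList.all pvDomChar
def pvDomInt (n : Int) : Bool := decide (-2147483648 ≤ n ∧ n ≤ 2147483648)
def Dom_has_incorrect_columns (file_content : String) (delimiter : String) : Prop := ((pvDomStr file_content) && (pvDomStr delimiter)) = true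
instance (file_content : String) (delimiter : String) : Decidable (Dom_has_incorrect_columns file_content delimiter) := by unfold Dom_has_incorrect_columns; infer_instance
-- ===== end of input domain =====

-- B replaces A's reference-count-plus-early-exit scan with "collect all distinct
-- per-row column counts into a set, then test cardinality > 1" (objective: simpler).


-- ===== PORT A =====
-- lines = file_content.splitlines(); if not lines: return False;
-- first = len(lines[0].split(delimiter)); for line in lines[1:]: if len(line.split(delimiter)) != first: return True; return False
def has_incorrect_columns (file_content : String) (delimiter : String) : Bool :=
  match PySem.Str.splitlines file_content with
  | [] => false
  | l0 :: rest =>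
    let first_row_columns := (PySem.Chars.splitOn l0.toList delimiter.toList).length
    rest.any (fun line => (PySem.Chars.splitOn line.toList delimiter.toList).length ≠ first_row_columns)

-- ===== PORT B =====
-- counts = {len(line.split(delimiter)) for line in file_content.splitlines()}; return len(counts) > 1
def has_incorrect_columns_alt (file_content : String) (delimiter : String) : Bool :=
  let counts : PySem.Set Nat :=
    PySem.Set.ofList ((PySem.Str.splitlines file_content).map
      (fun line => (PySem.Chars.splitOn line.toList delimiter.toList).length))
  decide (counts.length > 1)

-- ===== PRECONDITION & SPEC =====
-- Pre_ excludes only inputs where Python A raises ValueError: an empty delimiter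
-- with at least one line (line.split('') raises); with no lines A never splits.
def Pre_has_incorrect_columns (file_content : String) (delimiter : String) : Prop :=
  delimiter ≠ "" ∨ file_content = ""
instance (file_content : String) (delimiter : String) : Decidable (Pre_has_incorrect_columns file_content delimiter) := by unfold Pre_has_incorrect_columns; infer_instance

def pvWitness_has_incorrect_columns : String × String := ("a,b\nc", ",")

def Spec_has_incorrect_columns (file_content : String) (delimiter : String) (out : Bool) : Prop := out = has_incorrect_columns_alt file_content delimiter
instance (file_content : String) (delimiter : String) (out : Bool) : Decidable (Spec_has_incorrect_columns file_content delimiter out) := by unfold Spec_has_incorrect_columns; infer_instance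

-- ===== CLAIM (what is proved, stated in full; the proofs are below) =====
def Claim_equal_has_incorrect_columns : Prop := ∀ (file_content : String) (delimiter : String), Dom_has_incorrect_columns file_content delimiter → Pre_has_incorrect_columns file_content delimiter → Spec_has_incorrect_columns file_content delimiter (has_incorrect_columns file_content delimiter)

-- ===== LEMMAS AND PROOFS =====

-- Set.add never shrinks a set; folding adds over a list never shrinks it.
theorem pv_len_le_foldl_add (l : List Nat) : ∀ (s : PySem.Set Nat),
    s.length ≤ (l.foldl PySem.Set.add s).length := by
  induction l with
  | nil => intro s; simp
  | cons x l ih =>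
    intro s
    calc s.length ≤ (PySem.Set.add s x).length := by
          unfold PySem.Set.add; split <;> simp
      _ ≤ _ := ih _

-- Core fact: starting from the singleton {v}, the folded set exceeds size 1
-- exactly when some element of l differs from v.
theorem pv_foldl_add_singleton_gt_one (l : List Nat) : ∀ (v : Nat),
    (decide ((l.foldl PySem.Set.add [v]).length > 1)) = l.any (fun x => x ≠ v) := by
  induction l with
  | nil => intro v; simp
  | cons x l ih =>
    intro v
    by_cases hxv : x = v
    · subst hxv
      simp [List.foldl_cons, PySem.Set.add, PySem.Set.contains, ih]
    · have h2 : (2 : Nat) ≤ ((l.foldl PySem.Set.add [v, x]).length) := by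
        have := pv_len_le_foldl_add l [v, x]
        simpa using this
      have hadd : PySem.Set.add [v] x = [v, x] := by
        simp [PySem.Set.add, PySem.Set.contains, hxv]
      simp [List.foldl_cons, hxv]
      omega

-- ===== VERDICT (by name: the statement is the Claim_ definition above) =====
theorem has_incorrect_columns_spec : Claim_equal_has_incorrect_columns := by
  intro file_content delimiter _ _
  unfold Spec_has_incorrect_columns has_incorrect_columns has_incorrect_columns_alt
  cases h : PySem.Str.splitlines file_content with
  | nil => simp [PySem.Set.ofList]
  | cons l0 rest =>
    simp only [List.map_cons, PySem.Set.ofList, List.foldl_cons]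
    have hadd0 : PySem.Set.add PySem.Set.empty ((PySem.Chars.splitOn l0.toList delimiter.toList).length)
        = [(PySem.Chars.splitOn l0.toList delimiter.toList).length] := by
      simp [PySem.Set.empty, PySem.Set.add, PySem.Set.contains]
    simp only [hadd0]
    rw [pv_foldl_add_singleton_gt_one
      (rest.map (fun line => (PySem.Chars.splitOn line.toList delimiter.toList).length))]
    simp only [List.any_map]
    rfl
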